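-- pv_equiv track=rewrite | github.com/gaige/mdformat | mdformat/_api.py | replace_pelican_placeholdlers
-- ===== SOURCE A (Python) =====
-- def replace_pelican_placeholdlers(uri_key, attr_list):
--     new_attrs = []
--     for a in attr_list:
--         if a[0] == uri_key:
--             new_url = a[1]
--             for placeholder in ('author', 'category', 'index', 'tag', 'filename', 'static', 'attach'):
--                 new_url = new_url.replace("%7B" + placeholder + "%7D", '{' + placeholder + '}')
--             new_attrs += [[uri_key, new_url]]
--         else:
--             new_attrs += [a]
--     return new_attrs
-- ===== SOURCE B (Python) =====
-- PLACEHOLDERS = ('author', 'category', 'index', 'tag', 'filename', 'static', 'attach')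
-- TOKENS = [('%7B' + w + '%7D', '{' + w + '}') for w in PLACEHOLDERS]
--
--
-- def _decode_url(url):
--     # single left-to-right pass: at each position try every placeholder token once
--     out = []
--     i = 0
--     n = len(url)
--     while i < n:
--         for token, rep in TOKENS:
--             if url.startswith(token, i):
--                 out.append(rep)
--                 i += len(token)
--                 break
--         else:
--             out.append(url[i])
--             i += 1
--     return ''.join(out)
--
--
-- def replace_pelican_placeholdlers(uri_key, attr_list):
--     new_attrs = []
--     for a in attr_list:
--         if a[0] == uri_key:
--             new_attrs.append([uri_key, _decode_url(a[1])])
--         else: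
--             new_attrs.append(a)
--     return new_attrs
-- ===== Notes on version B (the rewrite author's own statement) =====
-- stated objective: alternative
-- what changed: B replaces the seven sequential full-string str.replace passes by a single left-to-right scan that matches any of the seven URL-encoded placeholders at each position (one pass builds the output once), keeping the outer attribute loop.
import Mathlib
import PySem

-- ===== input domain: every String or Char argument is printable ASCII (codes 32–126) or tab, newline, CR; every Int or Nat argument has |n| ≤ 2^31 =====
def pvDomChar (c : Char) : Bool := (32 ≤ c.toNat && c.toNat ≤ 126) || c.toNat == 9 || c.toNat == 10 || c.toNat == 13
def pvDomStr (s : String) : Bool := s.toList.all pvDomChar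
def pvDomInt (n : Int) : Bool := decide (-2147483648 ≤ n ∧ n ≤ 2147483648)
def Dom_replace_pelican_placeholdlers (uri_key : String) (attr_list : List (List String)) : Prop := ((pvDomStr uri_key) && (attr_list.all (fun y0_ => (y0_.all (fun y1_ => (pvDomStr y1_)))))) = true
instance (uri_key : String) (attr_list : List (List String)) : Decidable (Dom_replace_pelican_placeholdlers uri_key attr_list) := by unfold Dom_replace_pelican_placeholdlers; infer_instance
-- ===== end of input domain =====

-- B replaces A's seven sequential full-string str.replace passes by a single left-to-right scan
-- that matches any of the seven placeholders at each position (alternative decomposition, same result).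

-- ===== PORT A =====
def pvWords : List String := ["author", "category", "index", "tag", "filename", "static", "attach"]

def replace_pelican_placeholdlers (uri_key : String) (attr_list : List (List String)) : List (List String) :=
  attr_list.foldl (fun new_attrs a =>
    if PySem.List.pyGetD a 0 "" == uri_key then
      new_attrs ++ [[uri_key,
        pvWords.foldl (fun new_url w =>
          PySem.Str.replace new_url
            (String.ofList ('%' :: '7' :: 'B' :: (w.toList ++ ['%', '7', 'D'])))  -- "%7B" + w + "%7D" (string concat written on char lists; exact)
            (String.ofList ('{' :: (w.toList ++ ['}'])))) (PySem.List.pyGetD a 1 "")]]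
    else new_attrs ++ [a]) []

-- ===== PORT B =====
def pvPat (w : List Char) : List Char := '%' :: '7' :: 'B' :: (w ++ ['%', '7', 'D'])
def pvRep (w : List Char) : List Char := '{' :: (w ++ ['}'])

-- single pass: at each position try each placeholder token once (Source B's while/for-else loop)
def pvScan (ws : List (List Char)) (s : List Char) : List Char :=
  match h : ws.find? (fun w => PySem.Chars.startswith s (pvPat w)) with
  | some w => pvRep w ++ pvScan ws (s.drop (pvPat w).length)
  | none =>
    match s with
    | [] => []
    | c :: t => c :: pvScan ws t
termination_by s.length
decreasing_by
  · have hpred := List.find?_some h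
    have hp : pvPat w <+: s := (PySem.Chars.startswith_iff _ _).mp (by simpa using hpred)
    have h1 := hp.length_le
    have h2 : 0 < (pvPat w).length := by simp [pvPat]
    simp only [List.length_drop]
    omega
  · simp

def replace_pelican_placeholdlers_alt (uri_key : String) (attr_list : List (List String)) : List (List String) :=
  attr_list.foldl (fun new_attrs a =>
    if PySem.List.pyGetD a 0 "" == uri_key then
      new_attrs ++ [[uri_key, String.ofList (pvScan (pvWords.map String.toList) (PySem.List.pyGetD a 1 "").toList)]]
    else new_attrs ++ [a]) []

-- ===== PRECONDITION & SPEC =====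
-- Pre_ excludes exactly the inputs where Python A raises IndexError: an empty attribute (a[0])
-- or an attribute whose first entry equals uri_key but has no second entry (a[1]); B raises there too.
def Pre_replace_pelican_placeholdlers (uri_key : String) (attr_list : List (List String)) : Prop :=
  ∀ a ∈ attr_list, a ≠ [] ∧ (PySem.List.pyGetD a 0 "" = uri_key → 2 ≤ a.length)
instance (uri_key : String) (attr_list : List (List String)) : Decidable (Pre_replace_pelican_placeholdlers uri_key attr_list) := by unfold Pre_replace_pelican_placeholdlers; infer_instance

def pvWitness_replace_pelican_placeholdlers : String × List (List String) :=
  ("href", [["href", "%7Btag%7D/page.html"], ["alt", "x"]])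

def Spec_replace_pelican_placeholdlers (uri_key : String) (attr_list : List (List String)) (out : List (List String)) : Prop := out = replace_pelican_placeholdlers_alt uri_key attr_list
instance (uri_key : String) (attr_list : List (List String)) (out : List (List String)) : Decidable (Spec_replace_pelican_placeholdlers uri_key attr_list out) := by unfold Spec_replace_pelican_placeholdlers; infer_instance

-- ===== CLAIM (what is proved, stated in full; the proofs are below) =====
def Claim_equal_replace_pelican_placeholdlers : Prop := ∀ (uri_key : String) (attr_list : List (List String)), Dom_replace_pelican_placeholdlers uri_key attr_list → Pre_replace_pelican_placeholdlers uri_key attr_list → Spec_replace_pelican_placeholdlers uri_key attr_list (replace_pelican_placeholdlers uri_key attr_list)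

-- ===== LEMMAS AND PROOFS =====

-- clean structural form of Python's leftmost-nonoverlapping str.replace for one placeholder pattern
def pvRepP (w : List Char) (s : List Char) : List Char :=
  match s with
  | [] => []
  | c :: t =>
    if (pvPat w).isPrefixOf (c :: t) then pvRep w ++ pvRepP w ((c :: t).drop (pvPat w).length)
    else c :: pvRepP w t
termination_by s.length
decreasing_by
  · rename_i h
    have hp : pvPat w <+: c :: t := List.isPrefixOf_iff_prefix.mp h
    have h1 := hp.length_le
    have h2 : 0 < (pvPat w).length := by simp [pvPat]
    simp only [List.length_drop]
    simp only [List.length_cons] at h1 ⊢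
    omega
  · simp

lemma pv_go_spec (w : List Char) :
    ∀ fuel (l acc : List Char), l.length ≤ fuel →
      PySem.Chars.replace.go (pvPat w) (pvRep w) fuel l acc = acc.reverse ++ pvRepP w l := by
  intro fuel
  induction fuel with
  | zero =>
    intro l acc hl
    have hln : l = [] := by cases l <;> simp_all
    subst hln
    rw [PySem.Chars.replace.go.eq_def]
    simp [pvRepP]
  | succ n ih =>
    intro l acc hl
    cases l with
    | nil =>
      rw [PySem.Chars.replace.go.eq_def]
      simp [pvRepP]
    | cons c t =>
      rw [PySem.Chars.replace.go.eq_def]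
      simp only []
      by_cases h : (pvPat w).isPrefixOf (c :: t)
      · rw [if_pos h]
        have hp : pvPat w <+: c :: t := List.isPrefixOf_iff_prefix.mp h
        have h2 : 0 < (pvPat w).length := by simp [pvPat]
        have hlen : (List.drop (pvPat w).length (c :: t)).length ≤ n := by
          simp only [List.length_drop, List.length_cons]
          simp only [List.length_cons] at hl
          omega
        rw [ih _ _ hlen]
        rw [pvRepP, if_pos h]
        simp [List.append_assoc]
      · rw [if_neg h]
        rw [ih _ _ (by simp only [List.length_cons] at hl; omega)]
        rw [pvRepP, if_neg h]
        simp

lemma pv_replace_eq (w s : List Char) :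
    PySem.Chars.replace s (pvPat w) (pvRep w) = pvRepP w s := by
  unfold PySem.Chars.replace
  have hne : (pvPat w).isEmpty = false := by simp [pvPat]
  rw [hne]
  simpa using pv_go_spec w s.length s [] (le_refl _)

lemma pv_prefix_append_cases {p a v : List Char} (h : p <+: a ++ v) : p <+: a ∨ a <+: p := by
  obtain ⟨t, ht⟩ := h
  rcases List.append_eq_append_iff.mp ht with ⟨as, ha, _⟩ | ⟨bs, hb, _⟩
  · exact Or.inl ⟨as, ha.symm⟩
  · exact Or.inr ⟨bs, hb.symm⟩

-- u "blocks" pattern w: no occurrence of pvPat w can start inside u, whatever follows u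
def pvBlockB (w u : List Char) : Bool :=
  (List.range u.length).all fun k =>
    !(pvPat w).isPrefixOf (u.drop k) && !(u.drop k).isPrefixOf (pvPat w)

lemma pv_no_match {w u : List Char} (hb : pvBlockB w u = true) {k : Nat} (hk : k < u.length)
    (v : List Char) : ¬ pvPat w <+: u.drop k ++ v := by
  intro h
  have h2 := List.all_eq_true.mp hb k (List.mem_range.mpr hk)
  simp only [Bool.and_eq_true, Bool.not_eq_true'] at h2
  rcases pv_prefix_append_cases h with h' | h'
  · rw [List.isPrefixOf_iff_prefix.mpr h'] at h2
    exact absurd h2.1 (by simp)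
  · rw [List.isPrefixOf_iff_prefix.mpr h'] at h2
    exact absurd h2.2 (by simp)

lemma pvBlockB_tail {w : List Char} {c : Char} {u : List Char} (h : pvBlockB w (c :: u) = true) :
    pvBlockB w u = true := by
  rw [pvBlockB, List.all_eq_true]
  intro k hk
  have hk' := List.mem_range.mp hk
  have := List.all_eq_true.mp h (k + 1) (List.mem_range.mpr (by simp; omega))
  simpa using this

lemma pvScan_eq_some {ws : List (List Char)} {s w : List Char}
    (h : ws.find? (fun w => PySem.Chars.startswith s (pvPat w)) = some w) :
    pvScan ws s = pvRep w ++ pvScan ws (s.drop (pvPat w).length) := by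
  rw [pvScan.eq_def]
  split
  · rename_i w' h'
    rw [h] at h'
    cases h'
    rfl
  · rename_i h'
    rw [h] at h'
    cases h'

lemma pvScan_eq_none_cons {ws : List (List Char)} {c : Char} {t : List Char}
    (h : ws.find? (fun w => PySem.Chars.startswith (c :: t) (pvPat w)) = none) :
    pvScan ws (c :: t) = c :: pvScan ws t := by
  rw [pvScan.eq_def]
  split
  · rename_i w' h'
    rw [h] at h'
    cases h'
  · rfl

lemma pvScan_nil (ws : List (List Char)) : pvScan ws [] = [] := by
  rw [pvScan.eq_def]
  split
  · rename_i w h'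
    have := List.find?_some h'
    simp [PySem.Chars.startswith_iff, List.prefix_nil, pvPat] at this
  · rfl

lemma pvScan_empty : ∀ s : List Char, pvScan ([] : List (List Char)) s = s := by
  intro s
  induction s with
  | nil => exact pvScan_nil []
  | cons c t ih =>
    rw [pvScan_eq_none_cons rfl, ih]

lemma pvScan_skip {ws : List (List Char)} :
    ∀ (u v : List Char), (∀ w ∈ ws, pvBlockB w u = true) → pvScan ws (u ++ v) = u ++ pvScan ws v := by
  intro u
  induction u with
  | nil => intro v _; simp
  | cons c u' ih =>
    intro v hu
    have hnone : ws.find? (fun w => PySem.Chars.startswith (c :: (u' ++ v)) (pvPat w)) = none := by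
      rw [List.find?_eq_none]
      intro w hw
      simp only [PySem.Chars.startswith_iff]
      have := pv_no_match (hu w hw) (k := 0) (by simp) v
      simpa using this
    rw [List.cons_append, pvScan_eq_none_cons hnone]
    rw [ih v (fun w hw => pvBlockB_tail (hu w hw))]
    rfl

lemma pvRepP_front {w s : List Char} (h : pvPat w <+: s) :
    pvRepP w s = pvRep w ++ pvRepP w (s.drop (pvPat w).length) := by
  cases s with
  | nil => simp [List.prefix_nil, pvPat] at h
  | cons c t => rw [pvRepP, if_pos (List.isPrefixOf_iff_prefix.mpr h)]

lemma pvRepP_cons {w : List Char} {c : Char} {t : List Char} (h : ¬ pvPat w <+: c :: t) :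
    pvRepP w (c :: t) = c :: pvRepP w t := by
  rw [pvRepP, if_neg (fun hh => h (List.isPrefixOf_iff_prefix.mp hh))]

lemma pvRepP_skip {w : List Char} :
    ∀ (u v : List Char), pvBlockB w u = true → pvRepP w (u ++ v) = u ++ pvRepP w v := by
  intro u
  induction u with
  | nil => intro v _; simp
  | cons c u' ih =>
    intro v hu
    have hnp : ¬ pvPat w <+: c :: (u' ++ v) := by
      have := pv_no_match hu (k := 0) (by simp) v
      simpa using this
    rw [List.cons_append, pvRepP_cons hnp, ih v (pvBlockB_tail hu)]
    rfl

lemma pv_NC {w : List Char} : ∀ (s u : List Char), u <+: pvRepP w s → '{' ∉ u → u <+: s := by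
  intro s
  induction s with
  | nil =>
    intro u h _
    rw [pvRepP] at h
    exact h
  | cons c t ih =>
    intro u h hbr
    by_cases hp : pvPat w <+: c :: t
    · rw [pvRepP_front hp] at h
      cases u with
      | nil => exact List.nil_prefix
      | cons d u' =>
        exfalso
        have hd : d = '{' := by
          have hh : d :: u' <+: '{' :: ((w ++ ['}']) ++ pvRepP w ((c :: t).drop (pvPat w).length)) := by
            simpa [pvRep, List.cons_append, List.append_assoc] using h
          exact (List.cons_prefix_cons.mp hh).1
        exact hbr (by rw [hd]; exact List.mem_cons_self)
    · rw [pvRepP_cons hp] at h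
      cases u with
      | nil => exact List.nil_prefix
      | cons d u' =>
        obtain ⟨hd, h2⟩ := List.cons_prefix_cons.mp h
        rw [List.cons_prefix_cons]
        exact ⟨hd, ih u' h2 (fun hm => hbr (List.mem_cons_of_mem _ hm))⟩

lemma pvMain (w : List Char) (ws : List (List Char))
    (hblock : ∀ w' ∈ ws, pvBlockB w (pvPat w') = true)
    (hrep : ∀ w' ∈ ws, pvBlockB w' (pvRep w) = true)
    (hbrace : ∀ w' ∈ ws, '{' ∉ pvPat w')
    (hpair : ∀ w1 ∈ ws, ∀ w2 ∈ ws, pvPat w1 <+: pvPat w2 → w1 = w2) :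
    ∀ s, pvScan ws (pvRepP w s) = pvScan (w :: ws) s := by
  have key : ∀ n (s : List Char), s.length ≤ n → pvScan ws (pvRepP w s) = pvScan (w :: ws) s := by
    intro n
    induction n with
    | zero =>
      intro s hs
      have hsn : s = [] := by cases s <;> simp_all
      subst hsn
      rw [pvRepP]
      rw [pvScan_nil, pvScan_nil]
    | succ n ih =>
      intro s hs
      by_cases hA : pvPat w <+: s
      · obtain ⟨t, rfl⟩ := hA
        have hpl : 0 < (pvPat w).length := by simp [pvPat]
        have ht : t.length ≤ n := by
          simp only [List.length_append] at hs; omega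
        rw [pvRepP_front (List.prefix_append _ _), List.drop_left]
        rw [pvScan_skip (pvRep w) (pvRepP w t) hrep]
        have hfind : (w :: ws).find? (fun w' => PySem.Chars.startswith (pvPat w ++ t) (pvPat w')) = some w := by
          rw [List.find?_cons_of_pos]
          simp [PySem.Chars.startswith_iff, List.prefix_append]
        rw [pvScan_eq_some hfind, List.drop_left, ih t ht]
      · have hAs : PySem.Chars.startswith s (pvPat w) = false := by
          rw [← Bool.not_eq_true, PySem.Chars.startswith_iff]; exact hA
        cases hF : ws.find? (fun w' => PySem.Chars.startswith s (pvPat w')) with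
        | some w' =>
          have hmem := List.mem_of_find?_eq_some hF
          have hpredF := List.find?_some hF
          have hpw' : pvPat w' <+: s := (PySem.Chars.startswith_iff _ _).mp (by simpa using hpredF)
          obtain ⟨t, rfl⟩ := hpw'
          have hpl' : 0 < (pvPat w').length := by simp [pvPat]
          have ht : t.length ≤ n := by
            simp only [List.length_append] at hs; omega
          rw [pvRepP_skip _ _ (hblock w' hmem)]
          obtain ⟨hp', as, bs, hws, hfail⟩ := List.find?_eq_some_iff_append.mp hF
          have hfind2 : ws.find? (fun x => PySem.Chars.startswith (pvPat w' ++ pvRepP w t) (pvPat x)) = some w' := by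
            rw [List.find?_eq_some_iff_append]
            refine ⟨by simp [PySem.Chars.startswith_iff, List.prefix_append], as, bs, hws, ?_⟩
            intro a ha
            have hamem : a ∈ ws := by rw [hws]; exact List.mem_append_left _ ha
            simp only [Bool.not_eq_eq_eq_not, Bool.not_true, ← Bool.not_eq_true,
              PySem.Chars.startswith_iff]
            intro hpre
            have haw' : a = w' := by
              rcases pv_prefix_append_cases hpre with h1 | h1
              · exact hpair a hamem w' hmem h1
              · exact (hpair w' hmem a hamem h1).symm
            have := hfail a ha
            rw [haw'] at this
            rw [hp'] at this
            simp at this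
          rw [pvScan_eq_some hfind2, List.drop_left, ih t ht]
          have hfind3 : (w :: ws).find? (fun x => PySem.Chars.startswith (pvPat w' ++ t) (pvPat x)) = some w' := by
            rw [List.find?_cons_of_neg (by simp [hAs]), hF]
          rw [pvScan_eq_some hfind3, List.drop_left]
        | none =>
          cases s with
          | nil =>
            rw [pvRepP]
            rw [pvScan_nil, pvScan_nil]
          | cons c t =>
            have ht : t.length ≤ n := by
              simp only [List.length_cons] at hs; omega
            rw [pvRepP_cons hA]
            have hnone2 : ws.find? (fun w' => PySem.Chars.startswith (c :: pvRepP w t) (pvPat w')) = none := by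
              rw [List.find?_eq_none]
              intro x hx
              simp only [PySem.Chars.startswith_iff]
              intro hpre
              have hpre2 : pvPat x <+: pvRepP w (c :: t) := by
                rw [pvRepP_cons hA]; exact hpre
              have hx2 : pvPat x <+: c :: t := pv_NC _ _ hpre2 (hbrace x hx)
              have hne := List.find?_eq_none.mp hF x hx
              exact hne (by rw [PySem.Chars.startswith_iff]; exact hx2)
            rw [pvScan_eq_none_cons hnone2, ih t ht]
            have hnone3 : (w :: ws).find? (fun x => PySem.Chars.startswith (c :: t) (pvPat x)) = none := by
              rw [List.find?_cons_of_neg (by simp [hAs]), hF]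
            rw [pvScan_eq_none_cons hnone3]
  intro s
  exact key s.length s (le_refl _)

lemma pv_chain (s : List Char) :
    pvScan ["author".toList, "category".toList, "index".toList, "tag".toList,
      "filename".toList, "static".toList, "attach".toList] s =
      pvRepP "attach".toList (pvRepP "static".toList (pvRepP "filename".toList (pvRepP "tag".toList
        (pvRepP "index".toList (pvRepP "category".toList (pvRepP "author".toList s)))))) := by
  rw [← pvMain "author".toList _ (by decide) (by decide) (by decide) (by decide)]
  rw [← pvMain "category".toList _ (by decide) (by decide) (by decide) (by decide)]
  rw [← pvMain "index".toList _ (by decide) (by decide) (by decide) (by decide)]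
  rw [← pvMain "tag".toList _ (by decide) (by decide) (by decide) (by decide)]
  rw [← pvMain "filename".toList _ (by decide) (by decide) (by decide) (by decide)]
  rw [← pvMain "static".toList _ (by decide) (by decide) (by decide) (by decide)]
  rw [← pvMain "attach".toList _ (by decide) (by decide) (by decide) (by decide)]
  rw [pvScan_empty]

lemma pv_url (u : String) :
    pvWords.foldl (fun new_url w =>
      PySem.Str.replace new_url
        (String.ofList ('%' :: '7' :: 'B' :: (w.toList ++ ['%', '7', 'D'])))
        (String.ofList ('{' :: (w.toList ++ ['}'])))) u
    = String.ofList (pvScan (pvWords.map String.toList) u.toList) := by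
  have h1 : ∀ (x w : String),
      PySem.Str.replace x (String.ofList ('%' :: '7' :: 'B' :: (w.toList ++ ['%', '7', 'D'])))
        (String.ofList ('{' :: (w.toList ++ ['}'])))
      = String.ofList (pvRepP w.toList x.toList) := by
    intro x w
    unfold PySem.Str.replace
    rw [String.toList_ofList, String.toList_ofList]
    exact congrArg String.ofList (pv_replace_eq w.toList x.toList)
  simp only [pvWords, List.foldl_cons, List.foldl_nil]
  simp only [h1, String.toList_ofList]
  rw [show List.map String.toList ["author", "category", "index", "tag", "filename", "static", "attach"]
      = ["author".toList, "category".toList, "index".toList, "tag".toList,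
         "filename".toList, "static".toList, "attach".toList] from by simp]
  rw [pv_chain]

lemma pv_fold_shape (uri_key : String) (f : List String → String)
    (l : List (List String)) (acc : List (List String)) :
    l.foldl (fun new_attrs a =>
      if PySem.List.pyGetD a 0 "" == uri_key then new_attrs ++ [[uri_key, f a]]
      else new_attrs ++ [a]) acc
    = acc ++ l.map (fun a => if PySem.List.pyGetD a 0 "" == uri_key then [uri_key, f a] else a) := by
  have hfun : (fun (new_attrs : List (List String)) (a : List String) =>
      if PySem.List.pyGetD a 0 "" == uri_key then new_attrs ++ [[uri_key, f a]]
      else new_attrs ++ [a])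
      = fun new_attrs a =>
        new_attrs ++ [if PySem.List.pyGetD a 0 "" == uri_key then [uri_key, f a] else a] := by
    funext acc' a
    split <;> rfl
  rw [hfun, PySem.List.foldl_append_singleton_eq_map]

-- ===== VERDICT (by name: the statement is the Claim_ definition above) =====
theorem replace_pelican_placeholdlers_spec : Claim_equal_replace_pelican_placeholdlers := by
  intro uri_key attr_list _ _
  unfold Spec_replace_pelican_placeholdlers
  unfold replace_pelican_placeholdlers replace_pelican_placeholdlers_alt
  rw [pv_fold_shape uri_key
      (fun a => pvWords.foldl (fun new_url w =>
        PySem.Str.replace new_url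
          (String.ofList ('%' :: '7' :: 'B' :: (w.toList ++ ['%', '7', 'D'])))
          (String.ofList ('{' :: (w.toList ++ ['}'])))) (PySem.List.pyGetD a 1 "")),
      pv_fold_shape uri_key
      (fun a => String.ofList (pvScan (pvWords.map String.toList) (PySem.List.pyGetD a 1 "").toList))]
  simp only [List.nil_append]
  apply List.map_congr_left
  intro a _
  split
  · rw [pv_url]
  · rfl
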